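-- pv_equiv track=rewrite | github.com/PrinceOsiria/foobar | Lovely Lucky Lambs/solution.py | solution
-- ===== SOURCE A (Python) =====
-- def solution(lambs):
-- 	## Variables
-- 	minimum = 1
-- 	stingy = [minimum]
-- 	generous = [minimum]
--
-- 	## Generous Method - More lambs per employee, less employees included
-- 	number = minimum
-- 	while sum(generous) + number <= lambs:
-- 		if (number!=minimum) and number>=sum(generous[-2:number]) and number==sum(generous[-1:number])*2:
-- 			generous.append(number)
-- 		number += 1
--
-- 	## Stingy Method - Less lambs per employee, more employees included
-- 	number = minimum
-- 	while sum(stingy) + number <= lambs: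
-- 		if number>=sum(stingy[-2:number]) and number<=sum(stingy[-1:number])*2:
-- 			stingy.append(number)
-- 		number += 1
--
-- 	## Returns an integer which represents the difference between the minimum and maximum number of henchmen who can share the LAMBs
-- 	return abs(len(stingy) - len(generous))
-- ===== SOURCE B (Python) =====
-- def solution(lambs):
--     # generous: powers of two; count how many fit
--     g_total, g_next, g = 1, 2, 1
--     while g_total + g_next <= lambs:
--         g_total += g_next
--         g_next *= 2
--         g += 1
--     # stingy: Fibonacci; count how many fit
--     s_total, a, b, s = 1, 1, 1, 1
--     while s_total + b <= lambs:
--         s_total += b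
--         a, b = b, a + b
--         s += 1
--     return s - g
-- ===== Notes on version B (the rewrite author's own statement) =====
-- stated objective: faster
-- what changed: Instead of scanning every candidate number up to lambs and re-summing list slices to decide appends, B generates the powers-of-two and Fibonacci running sums directly (constant state, no lists) until the next term no longer fits, so the work is proportional to the number of terms rather than to lambs.
import Mathlib
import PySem

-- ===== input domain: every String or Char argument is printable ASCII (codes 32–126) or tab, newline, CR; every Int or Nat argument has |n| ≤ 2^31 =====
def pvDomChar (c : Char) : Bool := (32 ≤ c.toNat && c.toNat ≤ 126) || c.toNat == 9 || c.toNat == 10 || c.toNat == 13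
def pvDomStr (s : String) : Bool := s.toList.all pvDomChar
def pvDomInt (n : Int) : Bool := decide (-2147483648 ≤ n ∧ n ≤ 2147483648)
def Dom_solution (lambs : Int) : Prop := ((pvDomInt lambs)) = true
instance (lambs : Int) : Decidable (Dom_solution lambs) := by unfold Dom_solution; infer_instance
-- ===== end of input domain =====

-- B replaces A's scan of every candidate number (with list slices re-summed each step) by
-- directly generating the powers-of-two and Fibonacci running sums, one constant-work step per term.

-- ===== PORT A =====
-- Python's sum(xs)
def pySum (xs : List Int) : Int := xs.foldl (· + ·) 0

-- the generous while-loop; fuel bounds the number of checks of the while condition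
-- (fuel = lambs.toNat suffices: the loop body runs at most once per number = 1..lambs)
def genLoop (lambs : Int) (generous : List Int) (number : Int) : Nat → List Int
  | 0 => generous
  | fuel + 1 =>
    if pySum generous + number ≤ lambs then
      let generous' :=
        if number ≠ 1 ∧ pySum (PySem.List.slice generous (some (-2)) (some number)) ≤ number ∧
            number = pySum (PySem.List.slice generous (some (-1)) (some number)) * 2
        then generous ++ [number] else generous
      genLoop lambs generous' (number + 1) fuel
    else generous

-- the stingy while-loop
def stingyLoop (lambs : Int) (stingy : List Int) (number : Int) : Nat → List Int
  | 0 => stingy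
  | fuel + 1 =>
    if pySum stingy + number ≤ lambs then
      let stingy' :=
        if pySum (PySem.List.slice stingy (some (-2)) (some number)) ≤ number ∧
            number ≤ pySum (PySem.List.slice stingy (some (-1)) (some number)) * 2
        then stingy ++ [number] else stingy
      stingyLoop lambs stingy' (number + 1) fuel
    else stingy

def solution (lambs : Int) : Int :=
  let generous := genLoop lambs [1] 1 lambs.toNat
  let stingy := stingyLoop lambs [1] 1 lambs.toNat
  |((stingy.length : Int) - (generous.length : Int))|

-- ===== PORT B =====
-- generous count: running sum of powers of two (fuel only makes the while loop total;
-- lambs.toNat checks always suffice, since the running sum grows by at least 1 per step)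
def genGo (lambs total next cnt : Int) : Nat → Int
  | 0 => cnt
  | fuel + 1 =>
    if total + next ≤ lambs then genGo lambs (total + next) (2 * next) (cnt + 1) fuel
    else cnt

-- stingy count: running sum of the Fibonacci numbers
def fibGo (lambs total a b cnt : Int) : Nat → Int
  | 0 => cnt
  | fuel + 1 =>
    if total + b ≤ lambs then fibGo lambs (total + b) b (a + b) (cnt + 1) fuel
    else cnt

def solution_alt (lambs : Int) : Int :=
  let g := genGo lambs 1 2 1 lambs.toNat
  let s := fibGo lambs 1 1 1 1 lambs.toNat
  s - g

-- ===== PRECONDITION & SPEC =====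
def Spec_solution (lambs : Int) (out : Int) : Prop := out = solution_alt lambs
instance (lambs : Int) (out : Int) : Decidable (Spec_solution lambs out) := by unfold Spec_solution; infer_instance

-- ===== CLAIM (what is proved, stated in full; the proofs are below) =====
def Claim_equal_solution : Prop := ∀ (lambs : Int), Dom_solution lambs → Spec_solution lambs (solution lambs)

-- ===== LEMMAS AND PROOFS =====

-- [1, 2, 4, ..., 2^(k-1)] : the list A's generous loop builds
def powList : Nat → List Int
  | 0 => []
  | k + 1 => powList k ++ [2 ^ k]

def fibI (k : Nat) : Int := (Nat.fib k : Int)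

-- [fib 1, ..., fib k] : the list A's stingy loop builds
def fibList : Nat → List Int
  | 0 => []
  | k + 1 => fibList k ++ [fibI (k + 1)]

theorem foldl_add_shift (b : List Int) : ∀ c : Int, b.foldl (· + ·) c = c + b.foldl (· + ·) 0 := by
  induction b with
  | nil => intro c; simp
  | cons x xs ih => intro c; simp only [List.foldl_cons]; rw [ih (c + x), ih (0 + x)]; omega

theorem pySum_append (xs ys : List Int) : pySum (xs ++ ys) = pySum xs + pySum ys := by
  rw [pySum, List.foldl_append, foldl_add_shift]; rfl

theorem pySum_single (x : Int) : pySum [x] = x := by simp [pySum]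

theorem pySum_pair (x y : Int) : pySum [x, y] = x + y := by simp [pySum]

theorem length_powList (k : Nat) : (powList k).length = k := by
  induction k with
  | zero => rfl
  | succ k ih => simp [powList, ih]

theorem length_fibList (k : Nat) : (fibList k).length = k := by
  induction k with
  | zero => rfl
  | succ k ih => simp [fibList, ih]

theorem sum_powList (k : Nat) : pySum (powList k) = 2 ^ k - 1 := by
  induction k with
  | zero => rfl
  | succ k ih => rw [powList, pySum_append, ih, pySum_single, pow_succ]; ring

theorem fibI_add_two (k : Nat) : fibI (k + 2) = fibI (k + 1) + fibI k := by
  simp [fibI, Nat.fib_add_two]; ring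

theorem fibI_pos (k : Nat) : 1 ≤ fibI (k + 1) := by
  have h := Nat.fib_pos.mpr (Nat.succ_pos k)
  unfold fibI; exact_mod_cast h

theorem fibI_nonneg (k : Nat) : 0 ≤ fibI k := by simp [fibI]

theorem fibI_mono {j k : Nat} (h : j ≤ k) : fibI j ≤ fibI k := by
  simp only [fibI, Int.ofNat_le]
  exact Nat.fib_mono h

theorem sum_fibList (k : Nat) : pySum (fibList k) = fibI (k + 2) - 1 := by
  induction k with
  | zero => rfl
  | succ k ih =>
    rw [fibList, pySum_append, ih, pySum_single]
    have h := fibI_add_two (k + 1)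
    have h2 : fibI (k + 1 + 1) = fibI (k + 2) := rfl
    omega

theorem one_le_two_pow' (m : Nat) : (1 : Int) ≤ 2 ^ m := by
  have := pow_pos (show (0:Int) < 2 by norm_num) m; omega

-- k + 1 ≤ 2^k
theorem succ_le_two_pow (k : Nat) : ((k : Int) + 1) ≤ 2 ^ k := by
  induction k with
  | zero => norm_num
  | succ k ih =>
    have h := one_le_two_pow' k
    rw [pow_succ]
    push_cast
    omega

-- k ≤ fib k + 1
theorem fib_lower : ∀ k : Nat, (k : Int) ≤ fibI k + 1 := by
  intro k
  induction k using Nat.strong_induction_on with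
  | _ k ih =>
    match k with
    | 0 => norm_num [fibI]
    | 1 => norm_num [fibI]
    | 2 => norm_num [fibI]
    | (m + 3) =>
      have h1 := ih (m + 2) (by omega)
      have h2 : (1:Int) ≤ fibI (m + 2) := fibI_pos (m + 1)
      have h3 : fibI (m + 3) = fibI (m + 2) + fibI (m + 1) := fibI_add_two (m + 1)
      have h4 : (1:Int) ≤ fibI (m + 1) := fibI_pos m
      push_cast at h1 ⊢
      omega

theorem clampIdx_big (m : Nat) (n : Int) (h : (m : Int) ≤ n) : PySem.List.clampIdx m n = m := by
  unfold PySem.List.clampIdx; split_ifs <;> omega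

theorem clampIdx_m2 (m : Nat) : PySem.List.clampIdx m (-2) = m - 2 := by
  unfold PySem.List.clampIdx; split_ifs <;> omega

theorem clampIdx_m1 (m : Nat) : PySem.List.clampIdx m (-1) = m - 1 := by
  unfold PySem.List.clampIdx; split_ifs <;> omega

theorem slice_neg_two (xs : List Int) (n : Int) (h : (xs.length : Int) ≤ n) :
    PySem.List.slice xs (some (-2)) (some n) = xs.drop (xs.length - 2) := by
  show List.take (PySem.List.clampIdx xs.length n - PySem.List.clampIdx xs.length (-2))
      (List.drop (PySem.List.clampIdx xs.length (-2)) xs) = List.drop (xs.length - 2) xs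
  rw [clampIdx_big _ _ h, clampIdx_m2]
  apply List.take_of_length_le
  simp

theorem slice_neg_one (xs : List Int) (n : Int) (h : (xs.length : Int) ≤ n) :
    PySem.List.slice xs (some (-1)) (some n) = xs.drop (xs.length - 1) := by
  show List.take (PySem.List.clampIdx xs.length n - PySem.List.clampIdx xs.length (-1))
      (List.drop (PySem.List.clampIdx xs.length (-1)) xs) = List.drop (xs.length - 1) xs
  rw [clampIdx_big _ _ h, clampIdx_m1]
  apply List.take_of_length_le
  simp

theorem powList_drop_one (k : Nat) : (powList (k + 1)).drop k = [2 ^ k] := by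
  rw [powList]; exact List.drop_left' (length_powList k)

theorem fibList_drop_one (k : Nat) : (fibList (k + 1)).drop k = [fibI (k + 1)] := by
  rw [fibList]; exact List.drop_left' (length_fibList k)

theorem fibList_drop_two (k : Nat) : (fibList (k + 2)).drop k = [fibI (k + 1), fibI (k + 2)] := by
  rw [show fibList (k + 2) = fibList (k + 1) ++ [fibI (k + 2)] from rfl, fibList, List.append_assoc]
  exact List.drop_left' (length_fibList k)

theorem pySum_nonneg (xs : List Int) (h : ∀ x ∈ xs, 0 ≤ x) : 0 ≤ pySum xs := by
  induction xs with
  | nil => simp [pySum]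
  | cons x xs ih =>
    have hx := h x (by simp)
    have hxs := ih (fun y hy => h y (by simp [hy]))
    rw [show (x :: xs) = [x] ++ xs from rfl, pySum_append, pySum_single]
    omega

theorem pySum_drop_le (xs : List Int) (m : Nat) (h : ∀ x ∈ xs, 0 ≤ x) :
    pySum (xs.drop m) ≤ pySum xs := by
  conv_rhs => rw [← List.take_append_drop m xs]
  rw [pySum_append]
  have := pySum_nonneg (xs.take m) (fun x hx => h x (List.mem_of_mem_take hx))
  omega

theorem powList_nonneg (k : Nat) : ∀ x ∈ powList k, 0 ≤ x := by
  induction k with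
  | zero => simp [powList]
  | succ k ih =>
    intro x hx
    rw [powList, List.mem_append] at hx
    rcases hx with hx | hx
    · exact ih x hx
    · simp at hx; subst hx; exact le_of_lt (pow_pos (by norm_num) k)

-- a stopped genGo / fibGo returns its counter whatever fuel remains
theorem genGo_stop (lambs total next cnt : Int) (h : ¬ total + next ≤ lambs) :
    ∀ fuel, genGo lambs total next cnt fuel = cnt := by
  intro fuel
  cases fuel with
  | zero => rfl
  | succ fuel => rw [genGo, if_neg h]

theorem fibGo_stop (lambs total a b cnt : Int) (h : ¬ total + b ≤ lambs) :
    ∀ fuel, fibGo lambs total a b cnt fuel = cnt := by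
  intro fuel
  cases fuel with
  | zero => rfl
  | succ fuel => rw [fibGo, if_neg h]

-- invariant-carrying equivalence of A's generous loop with genGo
theorem gen_loop_eq (lambs : Int) : ∀ (fuel k : Nat) (n : Int), 1 ≤ k →
    2 ^ (k - 1) < n → n ≤ 2 ^ k → lambs < n + fuel →
    ∀ (fuelB : Nat), lambs + 1 - (2 ^ k - 1) ≤ fuelB →
    ((genLoop lambs (powList k) n fuel).length : Int) = genGo lambs (2 ^ k - 1) (2 ^ k) k fuelB := by
  intro fuel
  induction fuel with
  | zero =>
    intro k n hk h1 h2 hf fuelB hfB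
    push_cast at hf
    have hp := one_le_two_pow' (k - 1)
    have hp2 : (2:Int) ^ (k - 1) ≤ 2 ^ k := by
      apply pow_le_pow_right₀ <;> omega
    rw [genLoop, genGo_stop lambs _ _ _ (by omega)]
    simp [length_powList]
  | succ fuel ih =>
    intro k n hk h1 h2 hf fuelB hfB
    push_cast at hf
    rw [genLoop]
    by_cases hg : pySum (powList k) + n ≤ lambs
    · rw [if_pos hg]
      rw [sum_powList] at hg
      obtain ⟨k', rfl⟩ : ∃ k', k = k' + 1 := ⟨k - 1, by omega⟩
      have hpow1 : (1:Int) ≤ 2 ^ k' := one_le_two_pow' k'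
      have hpows : (2:Int) ^ (k' + 1) = 2 ^ k' * 2 := pow_succ 2 k'
      have h1' : (2:Int) ^ k' < n := h1
      have hklen : ((powList (k' + 1)).length : Int) ≤ n := by
        rw [length_powList]
        have := succ_le_two_pow k'
        push_cast
        omega
      rw [slice_neg_one _ _ hklen, slice_neg_two _ _ hklen, length_powList]
      have hlast : pySum ((powList (k' + 1)).drop (k' + 1 - 1)) = 2 ^ k' := by
        rw [show k' + 1 - 1 = k' from rfl, powList_drop_one, pySum_single]
      rw [hlast]
      by_cases happ : n = 2 ^ (k' + 1)
      · -- append step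
        have hcond : n ≠ 1 ∧ pySum ((powList (k' + 1)).drop (k' + 1 - 2)) ≤ n ∧
            n = 2 ^ k' * 2 := by
          refine ⟨by omega, ?_, by omega⟩
          have hd := pySum_drop_le (powList (k' + 1)) (k' + 1 - 2) (powList_nonneg (k' + 1))
          rw [sum_powList] at hd
          omega
        rw [if_pos hcond]
        have hpl : powList (k' + 1) ++ [n] = powList (k' + 2) := by
          rw [happ]; rfl
        rw [hpl]
        show ((genLoop lambs (powList (k' + 2)) (n + 1) fuel).length : Int) =
          genGo lambs (2 ^ (k' + 1) - 1) (2 ^ (k' + 1)) (((k' + 1 : Nat)) : Int) fuelB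
        have hpows2 : (2:Int) ^ (k' + 2) = 2 ^ (k' + 1) * 2 := pow_succ 2 (k' + 1)
        obtain ⟨fB, rfl⟩ : ∃ fB, fuelB = fB + 1 := ⟨fuelB - 1, by omega⟩
        have step := ih (k' + 2) (n + 1) (by omega)
          (show (2:Int) ^ (k' + 2 - 1) < n + 1 from show (2:Int) ^ (k' + 1) < n + 1 by omega)
          (by omega) (by omega) fB (by push_cast at hfB ⊢; omega)
        rw [step]
        rw [genGo, if_pos (show (2:Int) ^ (k' + 1) - 1 + 2 ^ (k' + 1) ≤ lambs by omega)]
        have e1 : (2:Int) ^ (k' + 2) - 1 = 2 ^ (k' + 1) - 1 + 2 ^ (k' + 1) := by omega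
        have e2 : (2:Int) ^ (k' + 2) = 2 * 2 ^ (k' + 1) := by omega
        have e3 : (((k' + 2 : Nat)) : Int) = ((k' + 1 : Nat) : Int) + 1 := by push_cast; ring
        rw [e1, e2, e3]
      · -- no append: the doubling test fails
        have hcond : ¬ (n ≠ 1 ∧ pySum ((powList (k' + 1)).drop (k' + 1 - 2)) ≤ n ∧
            n = 2 ^ k' * 2) := by
          rintro ⟨-, -, h3⟩
          omega
        rw [if_neg hcond]
        exact ih (k' + 1) (n + 1) (by omega)
          (show (2:Int) ^ (k' + 1 - 1) < n + 1 from show (2:Int) ^ k' < n + 1 by omega)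
          (by omega) (by omega) fuelB hfB
    · rw [if_neg hg]
      rw [sum_powList] at hg
      rw [genGo_stop lambs _ _ _ (by omega)]
      simp [length_powList]

-- invariant-carrying equivalence of A's stingy loop with fibGo
theorem stingy_loop_eq (lambs : Int) : ∀ (fuel k : Nat) (n : Int), 2 ≤ k →
    fibI k < n → n ≤ fibI (k + 1) → lambs < n + fuel →
    ∀ (fuelB : Nat), lambs + 1 - (fibI (k + 2) - 1) ≤ fuelB →
    ((stingyLoop lambs (fibList k) n fuel).length : Int) =
      fibGo lambs (fibI (k + 2) - 1) (fibI k) (fibI (k + 1)) k fuelB := by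
  intro fuel
  induction fuel with
  | zero =>
    intro k n hk h1 h2 hf fuelB hfB
    push_cast at hf
    have hp : (1:Int) ≤ fibI (k + 2) := fibI_pos (k + 1)
    have hm : fibI (k + 1) ≤ fibI (k + 2) := fibI_mono (by omega)
    have hnn : (0:Int) ≤ fibI (k + 1) := fibI_nonneg (k + 1)
    rw [stingyLoop, fibGo_stop lambs _ _ _ _ (by omega)]
    simp [length_fibList]
  | succ fuel ih =>
    intro k n hk h1 h2 hf fuelB hfB
    push_cast at hf
    rw [stingyLoop]
    by_cases hg : pySum (fibList k) + n ≤ lambs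
    · rw [if_pos hg]
      rw [sum_fibList] at hg
      obtain ⟨j, rfl⟩ : ∃ j, k = j + 2 := ⟨k - 2, by omega⟩
      have hadd3 : fibI (j + 3) = fibI (j + 2) + fibI (j + 1) := fibI_add_two (j + 1)
      have hadd4 : fibI (j + 4) = fibI (j + 3) + fibI (j + 2) := fibI_add_two (j + 2)
      have hadd5 : fibI (j + 5) = fibI (j + 4) + fibI (j + 3) := fibI_add_two (j + 3)
      have hp1 : (1:Int) ≤ fibI (j + 1) := fibI_pos j
      have hp2 : (1:Int) ≤ fibI (j + 2) := fibI_pos (j + 1)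
      have hm12 : fibI (j + 1) ≤ fibI (j + 2) := fibI_mono (by omega)
      have h2' : n ≤ fibI (j + 3) := h2
      have hg' : fibI (j + 4) - 1 + n ≤ lambs := hg
      have hfB' : lambs + 1 - (fibI (j + 4) - 1) ≤ fuelB := hfB
      have hklen : ((fibList (j + 2)).length : Int) ≤ n := by
        rw [length_fibList]
        have := fib_lower (j + 2)
        have e : fibI (j + 2) < n := h1
        omega
      rw [slice_neg_one _ _ hklen, slice_neg_two _ _ hklen, length_fibList]
      have hlast : pySum ((fibList (j + 2)).drop (j + 2 - 1)) = fibI (j + 2) := by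
        rw [show j + 2 - 1 = j + 1 from rfl,
            show (fibList (j + 2)).drop (j + 1) = (fibList (j + 1 + 1)).drop (j + 1) from rfl,
            fibList_drop_one, pySum_single]
      have hlast2 : pySum ((fibList (j + 2)).drop (j + 2 - 2)) = fibI (j + 3) := by
        rw [show j + 2 - 2 = j from rfl, fibList_drop_two, pySum_pair]
        omega
      rw [hlast, hlast2]
      by_cases happ : n = fibI (j + 3)
      · -- append step
        have hcond : fibI (j + 3) ≤ n ∧ n ≤ fibI (j + 2) * 2 := ⟨by omega, by omega⟩
        rw [if_pos hcond]
        have hpl : fibList (j + 2) ++ [n] = fibList (j + 3) := by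
          rw [happ]; rfl
        rw [hpl]
        show ((stingyLoop lambs (fibList (j + 3)) (n + 1) fuel).length : Int) =
          fibGo lambs (fibI (j + 2 + 2) - 1) (fibI (j + 2)) (fibI (j + 2 + 1)) (((j + 2 : Nat)) : Int) fuelB
        obtain ⟨fB, rfl⟩ : ∃ fB, fuelB = fB + 1 := ⟨fuelB - 1, by omega⟩
        have step := ih (j + 3) (n + 1) (by omega)
          (show fibI (j + 3) < n + 1 by omega)
          (show n + 1 ≤ fibI (j + 3 + 1) from show n + 1 ≤ fibI (j + 4) by omega)
          (by omega) fB
          (show lambs + 1 - (fibI (j + 3 + 2) - 1) ≤ (fB : Int) from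
            show lambs + 1 - (fibI (j + 5) - 1) ≤ (fB : Int) by push_cast at hfB' ⊢; omega)
        rw [step]
        rw [show fibI (j + 2 + 2) = fibI (j + 4) from rfl, show fibI (j + 2 + 1) = fibI (j + 3) from rfl]
        rw [fibGo, if_pos (show fibI (j + 4) - 1 + fibI (j + 3) ≤ lambs by omega)]
        have e1 : fibI (j + 3 + 2) - 1 = fibI (j + 4) - 1 + fibI (j + 3) := by
          rw [show fibI (j + 3 + 2) = fibI (j + 5) from rfl]; omega
        have e2 : fibI (j + 3 + 1) = fibI (j + 2) + fibI (j + 3) := by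
          rw [show fibI (j + 3 + 1) = fibI (j + 4) from rfl]; omega
        have e3 : (((j + 3 : Nat)) : Int) = ((j + 2 : Nat) : Int) + 1 := by push_cast; ring
        rw [e1, e2, e3]
      · -- no append: n has not yet reached the next Fibonacci number
        have hcond : ¬ (fibI (j + 3) ≤ n ∧ n ≤ fibI (j + 2) * 2) := by
          rintro ⟨hge, -⟩
          exact happ (by omega)
        rw [if_neg hcond]
        exact ih (j + 2) (n + 1) (by omega) (by omega)
          (show n + 1 ≤ fibI (j + 2 + 1) from show n + 1 ≤ fibI (j + 3) by omega)
          (by omega) fuelB hfB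
    · rw [if_neg hg]
      rw [sum_fibList] at hg
      have hp : (1:Int) ≤ fibI (k + 2) := fibI_pos (k + 1)
      have hm : fibI (k + 1) ≤ fibI (k + 2) := fibI_mono (by omega)
      rw [fibGo_stop lambs _ _ _ _ (by omega)]
      simp [length_fibList]

-- fibGo never returns less than its counter
theorem fibGo_ge (lambs : Int) : ∀ (fuel : Nat) (total a b cnt : Int),
    cnt ≤ fibGo lambs total a b cnt fuel := by
  intro fuel
  induction fuel with
  | zero => intro total a b cnt; exact le_refl cnt
  | succ fuel ih =>
    intro total a b cnt
    rw [fibGo]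
    by_cases hg : total + b ≤ lambs
    · rw [if_pos hg]
      have := ih (total + b) b (a + b) (cnt + 1)
      omega
    · rw [if_neg hg]

-- the stingy count dominates the generous count (Fibonacci sums grow no faster than power sums)
theorem fib_ge_gen (lambs : Int) : ∀ (fuel : Nat) (tg nx cg ts a b cs : Int),
    ts ≤ tg → 0 ≤ a → a ≤ b → b ≤ nx → cg ≤ cs →
    genGo lambs tg nx cg fuel ≤ fibGo lambs ts a b cs fuel := by
  intro fuel
  induction fuel with
  | zero => intro tg nx cg ts a b cs h1 h2 h3 h4 h5; exact h5
  | succ fuel ih =>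
    intro tg nx cg ts a b cs h1 h2 h3 h4 h5
    rw [genGo]
    by_cases hg : tg + nx ≤ lambs
    · rw [if_pos hg]
      rw [fibGo, if_pos (by omega)]
      exact ih (tg + nx) (2 * nx) (cg + 1) (ts + b) b (a + b) (cs + 1)
        (by omega) (by omega) (by omega) (by omega) (by omega)
    · rw [if_neg hg]
      calc cg ≤ cs := h5
        _ ≤ _ := fibGo_ge lambs (fuel + 1) ts a b cs

-- the two top-level counts agree
theorem gen_top (lambs : Int) :
    ((genLoop lambs [1] 1 lambs.toNat).length : Int) = genGo lambs 1 2 1 lambs.toNat := by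
  by_cases hl : lambs ≤ 1
  · rw [genGo_stop lambs _ _ _ (by omega)]
    obtain ⟨f, hf⟩ : ∃ f, lambs.toNat = f := ⟨_, rfl⟩
    rw [hf]
    cases f with
    | zero => rfl
    | succ f =>
      rw [genLoop, if_neg (by simp [pySum]; omega)]
      rfl
  · obtain ⟨f, hf⟩ : ∃ f, lambs.toNat = f + 1 := ⟨lambs.toNat - 1, by omega⟩
    rw [hf, genLoop, if_pos (by simp [pySum]; omega)]
    have hnoapp : ¬ ((1:Int) ≠ 1 ∧ pySum (PySem.List.slice [1] (some (-2)) (some 1)) ≤ 1 ∧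
        (1:Int) = pySum (PySem.List.slice [1] (some (-1)) (some 1)) * 2) := by
      rintro ⟨hne, -, -⟩; exact hne rfl
    rw [if_neg hnoapp]
    show ((genLoop lambs (powList 1) 2 f).length : Int) = genGo lambs 1 2 1 (f + 1)
    rw [gen_loop_eq lambs f 1 2 (by omega) (by norm_num) (by norm_num)
      (by omega) (f + 1) (by push_cast; omega)]
    rfl

theorem stingy_top (lambs : Int) :
    ((stingyLoop lambs [1] 1 lambs.toNat).length : Int) = fibGo lambs 1 1 1 1 lambs.toNat := by
  by_cases hl : lambs ≤ 1
  · rw [fibGo_stop lambs _ _ _ _ (by omega)]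
    obtain ⟨f, hf⟩ : ∃ f, lambs.toNat = f := ⟨_, rfl⟩
    rw [hf]
    cases f with
    | zero => rfl
    | succ f =>
      rw [stingyLoop, if_neg (by simp [pySum]; omega)]
      rfl
  · obtain ⟨f, hf⟩ : ∃ f, lambs.toNat = f + 1 := ⟨lambs.toNat - 1, by omega⟩
    rw [hf, stingyLoop, if_pos (by simp [pySum]; omega)]
    have happ : (pySum (PySem.List.slice [1] (some (-2)) (some 1)) ≤ (1:Int) ∧
        (1:Int) ≤ pySum (PySem.List.slice [1] (some (-1)) (some 1)) * 2) := by
      constructor <;> decide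
    rw [if_pos happ]
    show ((stingyLoop lambs (fibList 2) 2 f).length : Int) = fibGo lambs 1 1 1 1 (f + 1)
    have hfib4 : fibI (2 + 2) = 3 := by decide
    rw [stingy_loop_eq lambs f 2 2 (by omega) (by decide) (by decide)
      (by omega) f (by rw [hfib4]; push_cast; omega)]
    rw [fibGo, if_pos (show (1:Int) + 1 ≤ lambs by omega)]
    have e2 : fibI 2 = 1 := by decide
    have e3 : fibI (2 + 1) = 2 := by decide
    rw [hfib4, e2, e3]
    norm_num

-- ===== VERDICT (by name: the statement is the Claim_ definition above) =====
theorem solution_spec : Claim_equal_solution := by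
  unfold Claim_equal_solution Spec_solution
  intro lambs _
  show |((stingyLoop lambs [1] 1 lambs.toNat).length : Int) -
      ((genLoop lambs [1] 1 lambs.toNat).length : Int)| =
    fibGo lambs 1 1 1 1 lambs.toNat - genGo lambs 1 2 1 lambs.toNat
  rw [stingy_top lambs, gen_top lambs]
  have hge := fib_ge_gen lambs lambs.toNat 1 2 1 1 1 1 1
    (by omega) (by omega) (by omega) (by omega) (by omega)
  exact abs_of_nonneg (by omega)
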